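-- pv_equiv track=rewrite | github.com/Noverse0/completion_prediction | graph_builder.py | find_next_learning
-- ===== SOURCE A (Python) =====
-- def find_next_learning(student_list, target_activity, student_learning):
--     next_learning = []
--     for student in student_list:
--         first_activity_index = [i for i in range(len(student_learning[student])) if target_activity == student_learning[student][i]]
--         for index in first_activity_index:
--             if index+1 >= len(student_learning[student]):
--                 pass
--             else:
--                 next_learning.append(student_learning[student][index+1])
--     return next_learning
-- ===== SOURCE B (Python) =====
-- def find_next_learning(student_list, target_activity, student_learning):
--     def followers(seq):
--         if len(seq) < 2:
--             return []
--         rest = followers(seq[1:])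
--         return [seq[1]] + rest if seq[0] == target_activity else rest
--     table = {s: followers(seq) for s, seq in student_learning.items()}
--     result = []
--     for student in student_list:
--         result += table[student]
--     return result
-- ===== Notes on version B (the rewrite author's own statement) =====
-- stated objective: alternative
-- what changed: B precomputes, once per student in one staged pass over student_learning, a table mapping each student to the recursively-built list of elements following the target in their sequence, then just concatenates table lookups over student_list; A rescans the sequence with an index comprehension and bounds-checked index+1 loop on every occurrence of a student.
import Mathlib
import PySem

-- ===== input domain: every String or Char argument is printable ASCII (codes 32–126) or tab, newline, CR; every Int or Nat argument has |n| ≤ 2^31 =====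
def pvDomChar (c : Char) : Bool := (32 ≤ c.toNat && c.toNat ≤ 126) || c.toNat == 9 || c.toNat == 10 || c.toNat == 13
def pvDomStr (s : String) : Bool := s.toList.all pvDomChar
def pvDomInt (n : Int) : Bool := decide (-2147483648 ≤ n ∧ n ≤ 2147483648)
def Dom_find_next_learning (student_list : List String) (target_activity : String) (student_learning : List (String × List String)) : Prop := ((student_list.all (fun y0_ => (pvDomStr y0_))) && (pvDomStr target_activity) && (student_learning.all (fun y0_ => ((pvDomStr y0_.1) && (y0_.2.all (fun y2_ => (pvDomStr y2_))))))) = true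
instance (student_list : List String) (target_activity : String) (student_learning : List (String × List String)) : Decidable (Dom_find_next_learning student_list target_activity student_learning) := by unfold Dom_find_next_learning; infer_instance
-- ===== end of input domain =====

-- B precomputes a per-student table of followers (built by a recursive helper) in one staged pass over student_learning, then concatenates lookups; objective: alternative decomposition. Return value only; no mutation.


-- ===== PORT A =====
-- dict lookup student_learning[student] = first matching key; Pre_ guarantees the key is present (otherwise Python raises KeyError)
def find_next_learning (student_list : List String) (target_activity : String) (student_learning : List (String × List String)) : List String :=
  student_list.foldl (fun next_learning student =>
    let seq := (student_learning.lookup student).getD []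
    let first_activity_index := (PySem.List.pyRange 0 (seq.length : Int) 1).filter
      (fun i => target_activity == PySem.List.pyGetD seq i "")
    first_activity_index.foldl (fun next_learning index =>
      if (seq.length : Int) ≤ index + 1 then next_learning
      else next_learning ++ [PySem.List.pyGetD seq (index + 1) ""]) next_learning) []

-- ===== PORT B =====
-- recursive helper 'followers' of Source B: len(seq) < 2 → [], else prepend seq[1] iff seq[0] == target
def fnl_followers (t : String) : List String → List String
  | [] => []
  | [_] => []
  | a :: b :: rest =>
      let r := fnl_followers t (b :: rest)
      if a == t then b :: r else r

-- table built once over student_learning's items (dict keys are unique; lookup = first match); result = concatenation of lookups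
def find_next_learning_alt (student_list : List String) (target_activity : String) (student_learning : List (String × List String)) : List String :=
  let table := student_learning.map (fun p => (p.1, fnl_followers target_activity p.2))
  student_list.foldl (fun result student => result ++ ((table.lookup student).getD [])) []

-- ===== PRECONDITION & SPEC =====
-- Pre_ excludes only student lists naming a student absent from student_learning, on which Python A raises KeyError.
def Pre_find_next_learning (student_list : List String) (target_activity : String) (student_learning : List (String × List String)) : Prop :=
  ∀ s ∈ student_list, s ∈ student_learning.map Prod.fst
instance (student_list : List String) (target_activity : String) (student_learning : List (String × List String)) : Decidable (Pre_find_next_learning student_list target_activity student_learning) := by unfold Pre_find_next_learning; infer_instance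
def pvWitness_find_next_learning : List String × String × (List (String × List String)) :=
  (["a", "b", "a"], "x", [("a", ["x", "y", "x", "z"]), ("b", ["y", "x"])])

def Spec_find_next_learning (student_list : List String) (target_activity : String) (student_learning : List (String × List String)) (out : List String) : Prop := out = find_next_learning_alt student_list target_activity student_learning
instance (student_list : List String) (target_activity : String) (student_learning : List (String × List String)) (out : List String) : Decidable (Spec_find_next_learning student_list target_activity student_learning out) := by unfold Spec_find_next_learning; infer_instance

-- ===== CLAIM (what is proved, stated in full; the proofs are below) =====
def Claim_equal_find_next_learning : Prop := ∀ (student_list : List String) (target_activity : String) (student_learning : List (String × List String)), Dom_find_next_learning student_list target_activity student_learning → Pre_find_next_learning student_list target_activity student_learning → Spec_find_next_learning student_list target_activity student_learning (find_next_learning student_list target_activity student_learning)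

-- ===== LEMMAS AND PROOFS =====

-- index form of a single sequence's pass (A side, pushed down to List.range) equals the adjacent-pairs filter/map
theorem fnl_key (t : String) (seq : List String) :
    ((List.range seq.length).filter
        (fun k : ℕ => decide (¬ ((seq.length : Int) ≤ (k : Int) + 1)) && (t == PySem.List.pyGetD seq (k : Int) ""))).map
      (fun k : ℕ => PySem.List.pyGetD seq ((k : Int) + 1) "")
    = ((seq.zip seq.tail).filter (fun p => p.1 == t)).map (fun p => p.2) := by
  induction seq with
  | nil => rfl
  | cons a l ih =>
      have hP : ((fun k : ℕ => decide (¬ (((l.length + 1 : ℕ) : Int) ≤ (k : Int) + 1)) && (t == PySem.List.pyGetD (a :: l) (k : Int) "")) ∘ Nat.succ)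
          = fun k : ℕ => decide (¬ ((l.length : Int) ≤ (k : Int) + 1)) && (t == PySem.List.pyGetD l (k : Int) "") := by
        funext k
        simp only [Function.comp_apply, PySem.List.pyGetD_natCast, List.getD_cons_succ]
        congr 1
        rw [decide_eq_decide]
        push_cast
        omega
      have hG : ((fun k : ℕ => PySem.List.pyGetD (a :: l) ((k : Int) + 1) "") ∘ Nat.succ)
          = fun k : ℕ => PySem.List.pyGetD l ((k : Int) + 1) "" := by
        funext k
        rw [Function.comp_apply,
          show ((Nat.succ k : ℕ) : Int) + 1 = ((k + 2 : ℕ) : Int) by push_cast; ring,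
          show ((k : Int) + 1) = ((k + 1 : ℕ) : Int) by push_cast; ring,
          PySem.List.pyGetD_natCast, PySem.List.pyGetD_natCast]
        simp
      rw [List.length_cons, List.range_succ_eq_map, List.filter_cons, List.filter_map, hP]
      split_ifs with hc
      · rw [List.map_cons, List.map_map, hG, ih]
        cases l with
        | nil => simp at hc
        | cons b l' =>
            simp only [Bool.and_eq_true, beq_iff_eq, decide_eq_true_eq,
              PySem.List.pyGetD_zero_cons, Nat.cast_zero] at hc
            rw [show ((0 : ℕ) : Int) + 1 = ((1 : ℕ) : Int) by norm_num,
              PySem.List.pyGetD_natCast]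
            simp [hc.2]
      · rw [List.map_map, hG, ih]
        cases l with
        | nil => simp
        | cons b l' =>
            simp only [Bool.and_eq_true, beq_iff_eq, decide_eq_true_eq,
              PySem.List.pyGetD_zero_cons, Nat.cast_zero, not_and] at hc
            have hta : ¬ (t = a) := hc (by simp only [List.length_cons]; push_cast; omega)
            have hat : (a == t) = false := by
              simp only [beq_eq_false_iff_ne, ne_eq]
              exact fun h => hta h.symm
            simp [hat]

-- the adjacent-pairs filter/map is exactly B's recursive followers
theorem followers_eq (t : String) : ∀ seq : List String,
    ((seq.zip seq.tail).filter (fun p => p.1 == t)).map (fun p => p.2) = fnl_followers t seq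
  | [] => rfl
  | [_] => rfl
  | a :: b :: rest => by
      have ih := followers_eq t (b :: rest)
      simp only [List.tail_cons, List.zip_cons_cons, List.filter_cons] at *
      by_cases h : (a == t) = true
      · simp [fnl_followers, h, ih]
      · simp only [Bool.not_eq_true] at h
        simp [fnl_followers, h, ih]

-- A's inner per-student pass appends exactly fnl_followers
theorem fnl_inner_eq (t : String) (seq acc : List String) :
    ((PySem.List.pyRange 0 (seq.length : Int) 1).filter
        (fun i => t == PySem.List.pyGetD seq i "")).foldl
      (fun nl index =>
        if (seq.length : Int) ≤ index + 1 then nl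
        else nl ++ [PySem.List.pyGetD seq (index + 1) ""]) acc
    = acc ++ fnl_followers t seq := by
  have hfun : (fun (nl : List String) (index : Int) =>
      if (seq.length : Int) ≤ index + 1 then nl
      else nl ++ [PySem.List.pyGetD seq (index + 1) ""])
    = fun nl index => if ¬ ((seq.length : Int) ≤ index + 1) then nl ++ [PySem.List.pyGetD seq (index + 1) ""] else nl := by
    funext nl i
    by_cases h : (seq.length : Int) ≤ i + 1 <;> simp [h]
  rw [hfun, PySem.List.foldl_append_ite, List.filter_filter,
    PySem.List.pyRange_zero_natCast, List.filter_map, List.map_map]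
  exact congrArg (acc ++ ·) ((fnl_key t seq).trans (followers_eq t seq))

-- lookup in the mapped table = map over the original lookup
theorem fnl_lookup_map (t : String) (s : String) : ∀ d : List (String × List String),
    (d.map (fun p => (p.1, fnl_followers t p.2))).lookup s
      = (d.lookup s).map (fnl_followers t)
  | [] => rfl
  | p :: rest => by
      by_cases h : (s == p.1) = true
      · simp [List.lookup, h]
      · simp only [Bool.not_eq_true] at h
        simp [List.lookup, h, fnl_lookup_map t s rest]

-- both outer folds agree from any common accumulator
theorem fnl_outer_eq (t : String) (d : List (String × List String)) :
    ∀ (sl : List String) (acc : List String),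
    sl.foldl (fun nl student =>
      let seq := (d.lookup student).getD []
      ((PySem.List.pyRange 0 (seq.length : Int) 1).filter
        (fun i => t == PySem.List.pyGetD seq i "")).foldl
        (fun nl index =>
          if (seq.length : Int) ≤ index + 1 then nl
          else nl ++ [PySem.List.pyGetD seq (index + 1) ""]) nl) acc
    = sl.foldl (fun result student =>
        result ++ ((((d.map (fun p => (p.1, fnl_followers t p.2))).lookup student).getD []))) acc := by
  intro sl
  induction sl with
  | nil => intro acc; rfl
  | cons s rest ih =>
      intro acc
      simp only [List.foldl_cons]
      rw [fnl_inner_eq, fnl_lookup_map]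
      have : ((d.lookup s).map (fnl_followers t)).getD []
          = fnl_followers t ((d.lookup s).getD []) := by
        cases d.lookup s <;> rfl
      rw [this]
      exact ih _

-- ===== VERDICT (by name: the statement is the Claim_ definition above) =====
theorem find_next_learning_spec : Claim_equal_find_next_learning := by
  intro sl t d _ _
  unfold Spec_find_next_learning find_next_learning find_next_learning_alt
  exact fnl_outer_eq t d sl []
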